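-- pv_equiv track=rewrite | github.com/seyed0123/classic_AI | AI-Project/AI-Project/401243133.py | max_contiguous
-- ===== SOURCE A (Python) =====
-- from typing import List, Optional, Tuple
--
-- def max_contiguous(board: List[List[Optional[str]]], symbol: str) -> int:
--     N = len(board)
--     max_len = 0
--
--     for row in board:
--         count = 0
--         for cell in row:
--             count = count + 1 if cell == symbol else 0
--             max_len = max(max_len, count)
--
--     for col in range(N):
--         count = 0
--         for row in range(N):
--             count = count + 1 if board[row][col] == symbol else 0
--             max_len = max(max_len, count)
--
--     count = 0
--     for i in range(N):
--         count = count + 1 if board[i][i] == symbol else 0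
--         max_len = max(max_len, count)
--
--     count = 0
--     for i in range(N):
--         count = count + 1 if board[i][N - 1 - i] == symbol else 0
--         max_len = max(max_len, count)
--
--     return max_len
-- ===== SOURCE B (Python) =====
-- from typing import List, Optional
--
-- def max_contiguous(board: List[List[Optional[str]]], symbol: str) -> int:
--     n = len(board)
--     lines = list(board)
--     lines += [[board[r][c] for r in range(n)] for c in range(n)]
--     lines.append([board[i][i] for i in range(n)])
--     lines.append([board[i][n - 1 - i] for i in range(n)])
--     best = 0
--     for line in lines:
--         breaks = [-1] + [i for i, cell in enumerate(line) if cell != symbol] + [len(line)]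
--         best = max(best, max(b - a - 1 for a, b in zip(breaks, breaks[1:])))
--     return best
-- ===== Notes on version B (the rewrite author's own statement) =====
-- stated objective: idiomatic
-- what changed: The four separate scan loops with a running counter are replaced by building one list of all lines (rows, columns, two diagonals) and computing each line's longest run by index arithmetic on the positions of mismatching cells (gaps between consecutive breaks), taking one max over all lines.
import Mathlib
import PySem

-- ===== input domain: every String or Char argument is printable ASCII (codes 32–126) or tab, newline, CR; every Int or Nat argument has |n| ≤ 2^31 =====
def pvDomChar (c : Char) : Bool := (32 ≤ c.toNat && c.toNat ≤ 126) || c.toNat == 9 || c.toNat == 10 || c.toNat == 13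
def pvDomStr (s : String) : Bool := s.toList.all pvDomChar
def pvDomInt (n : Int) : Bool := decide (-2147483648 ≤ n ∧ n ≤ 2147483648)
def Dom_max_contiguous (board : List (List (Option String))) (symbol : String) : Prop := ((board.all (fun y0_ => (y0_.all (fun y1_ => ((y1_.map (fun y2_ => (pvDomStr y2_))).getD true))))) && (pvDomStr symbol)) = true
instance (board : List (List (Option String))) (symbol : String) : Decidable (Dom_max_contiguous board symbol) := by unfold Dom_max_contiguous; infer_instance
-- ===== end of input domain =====

-- B replaces A's four running-counter scan loops by one list of all lines (rows, columns,
-- diagonals) and a break-position/gap computation per line; objective: idiomatic, not faster.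

-- ===== PORT A =====
-- A's inner-loop body: count = count + 1 if cell == symbol else 0; max_len = max(max_len, count)
def pvStepA (symbol : String) (p : Int × Int) (cell : Option String) : Int × Int :=
  let c : Int := if cell = some symbol then p.2 + 1 else 0
  (max p.1 c, c)

def max_contiguous (board : List (List (Option String))) (symbol : String) : Int :=
  let N : Int := board.length
  let m1 := board.foldl (fun maxLen row => (row.foldl (pvStepA symbol) (maxLen, 0)).1) 0
  let m2 := (PySem.List.pyRange 0 N 1).foldl (fun maxLen col =>
      ((PySem.List.pyRange 0 N 1).foldl
        (fun p r => pvStepA symbol p (PySem.List.pyGetD (PySem.List.pyGetD board r []) col none))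
        (maxLen, 0)).1) m1
  let m3 := ((PySem.List.pyRange 0 N 1).foldl
      (fun p i => pvStepA symbol p (PySem.List.pyGetD (PySem.List.pyGetD board i []) i none))
      (m2, 0)).1
  ((PySem.List.pyRange 0 N 1).foldl
      (fun p i => pvStepA symbol p (PySem.List.pyGetD (PySem.List.pyGetD board i []) (N - 1 - i) none))
      (m3, 0)).1

-- ===== PORT B =====
-- breaks = [-1] + [i for i, cell in enumerate(line) if cell != symbol] + [len(line)];
-- longest run = max(b - a - 1 for a, b in zip(breaks, breaks[1:]))  (never empty: breaks has ≥ 2 entries)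
def pvLineBest (line : List (Option String)) (symbol : String) : Int :=
  let breaks : List Int :=
    -1 :: (((PySem.List.enumerate line 0).filter (fun p => p.2 ≠ some symbol)).map (fun p => p.1)
           ++ [(line.length : Int)])
  (PySem.List.max? ((breaks.zip breaks.tail).map (fun p => p.2 - p.1 - 1)) (fun y => y)).getD 0

def max_contiguous_alt (board : List (List (Option String))) (symbol : String) : Int :=
  let n : Int := board.length
  let lines : List (List (Option String)) :=
    board
      ++ (PySem.List.pyRange 0 n 1).map (fun c =>
           (PySem.List.pyRange 0 n 1).map (fun r =>
             PySem.List.pyGetD (PySem.List.pyGetD board r []) c none))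
      ++ [(PySem.List.pyRange 0 n 1).map (fun i =>
             PySem.List.pyGetD (PySem.List.pyGetD board i []) i none)]
      ++ [(PySem.List.pyRange 0 n 1).map (fun i =>
             PySem.List.pyGetD (PySem.List.pyGetD board i []) (n - 1 - i) none)]
  lines.foldl (fun best line => max best (pvLineBest line symbol)) 0

-- ===== PRECONDITION & SPEC =====
-- Pre_ excludes ragged boards having a row shorter than len(board): there the column pass of
-- Python A (and B's column comprehension alike) raises IndexError.
def Pre_max_contiguous (board : List (List (Option String))) (symbol : String) : Prop :=
  ∀ row ∈ board, board.length ≤ row.length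
instance (board : List (List (Option String))) (symbol : String) : Decidable (Pre_max_contiguous board symbol) := by unfold Pre_max_contiguous; infer_instance

def pvWitness_max_contiguous : List (List (Option String)) × String :=
  ([[some "X", none], [none, some "X"]], "X")

def Spec_max_contiguous (board : List (List (Option String))) (symbol : String) (out : Int) : Prop := out = max_contiguous_alt board symbol
instance (board : List (List (Option String))) (symbol : String) (out : Int) : Decidable (Spec_max_contiguous board symbol out) := by unfold Spec_max_contiguous; infer_instance

-- ===== CLAIM (what is proved, stated in full; the proofs are below) =====
def Claim_equal_max_contiguous : Prop := ∀ (board : List (List (Option String))) (symbol : String), Dom_max_contiguous board symbol → Pre_max_contiguous board symbol → Spec_max_contiguous board symbol (max_contiguous board symbol)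

-- ===== LEMMAS AND PROOFS =====

-- max over the consecutive gaps of the break list (a :: l), minus one each
def pvGv (l : List Int) (a : Int) : Int :=
  match l with
  | [] => 0
  | [b] => b - a - 1
  | b :: t => max (b - a - 1) (pvGv t b)

theorem pvGv_singleton (b a : Int) : pvGv [b] a = b - a - 1 := rfl

theorem pvGv_cons (b : Int) (l : List Int) (a : Int) (h : l ≠ []) :
    pvGv (b :: l) a = max (b - a - 1) (pvGv l b) := by
  cases l with
  | nil => exact absurd rfl h
  | cons x t => rfl

theorem pv_foldl_max_init (t : List Int) (a x : Int) :
    List.foldl max (max a x) t = max a (List.foldl max x t) := by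
  induction t generalizing x with
  | nil => rfl
  | cons y t ih =>
    simp only [List.foldl]
    rw [max_assoc, ih]

theorem pv_pipeline_eq_gv (l : List Int) (a : Int) (h : l ≠ []) :
    (PySem.List.max? (((a :: l).zip l).map (fun p => p.2 - p.1 - 1)) (fun y => y)).getD 0
      = pvGv l a := by
  induction l generalizing a with
  | nil => exact absurd rfl h
  | cons b t ih =>
    cases t with
    | nil =>
      simp [PySem.List.max?_id_cons]
      rw [pvGv_singleton]
    | cons x t' =>
      have hzip : ((a :: b :: x :: t').zip (b :: x :: t')).map (fun p => p.2 - p.1 - 1)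
          = (b - a - 1) :: ((b :: x :: t').zip (x :: t')).map (fun p => p.2 - p.1 - 1) := rfl
      rw [hzip]
      have ih' := ih (a := b) (by simp)
      rw [pvGv_cons b (x :: t') a (by simp), ← ih']
      have hzip2 : ((b :: x :: t').zip (x :: t')).map (fun p => p.2 - p.1 - 1)
          = (x - b - 1) :: ((x :: t').zip t').map (fun p => p.2 - p.1 - 1) := rfl
      rw [hzip2]
      rw [PySem.List.max?_id_cons, PySem.List.max?_id_cons]
      simp only [Option.getD_some]
      exact pv_foldl_max_init _ _ _

-- B's per-line value, generalized: start index s, current-run credit c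
def pvLineVal (symbol : String) (s c : Int) (line : List (Option String)) : Int :=
  pvGv ((((PySem.List.enumerate line s).filter (fun p => p.2 ≠ some symbol)).map (fun p => p.1))
        ++ [s + (line.length : Int)]) (s - 1 - c)

theorem pvLineBest_eq_lineVal (line : List (Option String)) (symbol : String) :
    pvLineBest line symbol = pvLineVal symbol 0 0 line := by
  unfold pvLineBest pvLineVal
  have h : (((PySem.List.enumerate line 0).filter (fun p => p.2 ≠ some symbol)).map (fun p => p.1)
      ++ [(line.length : Int)]) ≠ [] := by simp
  have := pv_pipeline_eq_gv
    ((((PySem.List.enumerate line 0).filter (fun p => p.2 ≠ some symbol)).map (fun p => p.1))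
      ++ [(line.length : Int)]) (-1) h
  simp only [List.tail_cons] at *
  rw [this]
  norm_num

theorem pvLineVal_cons_match (symbol : String) (s c : Int) (cell : Option String)
    (rest : List (Option String)) (h : cell = some symbol) :
    pvLineVal symbol s c (cell :: rest) = pvLineVal symbol (s + 1) (c + 1) rest := by
  unfold pvLineVal
  rw [PySem.List.enumerate_cons]
  have : (s - 1 - c) = (s + 1 - 1 - (c + 1)) := by ring
  rw [this]
  congr 2
  · simp [h]
  · have hlen : s + ((cell :: rest).length : Int) = s + 1 + (rest.length : Int) := by
      push_cast [List.length_cons]; ring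
    rw [hlen]

theorem pvLineVal_cons_miss (symbol : String) (s c : Int) (cell : Option String)
    (rest : List (Option String)) (h : cell ≠ some symbol) :
    pvLineVal symbol s c (cell :: rest) = max c (pvLineVal symbol (s + 1) 0 rest) := by
  unfold pvLineVal
  rw [PySem.List.enumerate_cons]
  rw [List.filter_cons_of_pos (by simpa using h)]
  simp only [List.map_cons, List.cons_append]
  rw [pvGv_cons _ _ _ (by simp)]
  have h1 : s - (s - 1 - c) - 1 = c := by ring
  have h2 : s + (((cell :: rest).length : Nat) : Int)
      = (s + 1) + (rest.length : Int) := by push_cast [List.length_cons]; ring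
  have h3 : s = s + 1 - 1 - 0 := by ring
  rw [h1, h2]
  congr 3

theorem pvLineVal_ge (symbol : String) (line : List (Option String)) (s c : Int)
    (hc : 0 ≤ c) : c ≤ pvLineVal symbol s c line := by
  induction line generalizing s c with
  | nil =>
    unfold pvLineVal
    simp only [PySem.List.enumerate_nil, List.filter_nil, List.map_nil, List.nil_append,
      List.length_nil, Nat.cast_zero, add_zero]
    rw [pvGv_singleton]
    omega
  | cons cell rest ih =>
    by_cases h : cell = some symbol
    · rw [pvLineVal_cons_match symbol s c cell rest h]
      have := ih (s + 1) (c + 1) (by omega)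
      omega
    · rw [pvLineVal_cons_miss symbol s c cell rest h]
      exact le_max_left _ _

theorem pv_fold_line (symbol : String) (line : List (Option String)) (m c s : Int)
    (hc : 0 ≤ c) (hcm : c ≤ m) :
    (line.foldl (pvStepA symbol) (m, c)).1 = max m (pvLineVal symbol s c line) := by
  induction line generalizing m c s with
  | nil =>
    unfold pvLineVal
    simp only [List.foldl_nil, PySem.List.enumerate_nil, List.filter_nil, List.map_nil,
      List.nil_append, List.length_nil, Nat.cast_zero, add_zero]
    rw [pvGv_singleton]
    omega
  | cons cell rest ih =>
    simp only [List.foldl_cons]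
    by_cases h : cell = some symbol
    · rw [pvLineVal_cons_match symbol s c cell rest h]
      have hstep : pvStepA symbol (m, c) cell = (max m (c + 1), c + 1) := by
        simp [pvStepA, h]
      rw [hstep, ih (max m (c + 1)) (c + 1) (s + 1) (by omega) (le_max_right _ _)]
      have := pvLineVal_ge symbol rest (s + 1) (c + 1) (by omega)
      omega
    · rw [pvLineVal_cons_miss symbol s c cell rest h]
      have hstep : pvStepA symbol (m, c) cell = (m, 0) := by
        simp [pvStepA, h]
        omega
      rw [hstep, ih m 0 (s + 1) le_rfl (by omega)]
      have := pvLineVal_ge symbol rest (s + 1) 0 le_rfl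
      omega

theorem pv_fold_line0 (symbol : String) (line : List (Option String)) (m : Int) (hm : 0 ≤ m) :
    (line.foldl (pvStepA symbol) (m, 0)).1 = max m (pvLineBest line symbol) := by
  rw [pvLineBest_eq_lineVal]
  exact pv_fold_line symbol line m 0 0 le_rfl hm

theorem pv_fold_lines (symbol : String) (lines : List (List (Option String))) (m : Int)
    (hm : 0 ≤ m) :
    lines.foldl (fun acc line => (line.foldl (pvStepA symbol) (acc, 0)).1) m
      = lines.foldl (fun best line => max best (pvLineBest line symbol)) m := by
  induction lines generalizing m with
  | nil => rfl
  | cons l ls ih =>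
    simp only [List.foldl_cons]
    rw [pv_fold_line0 symbol l m hm]
    exact ih (max m (pvLineBest l symbol)) (by omega)

theorem pv_fold_lines_nonneg (symbol : String) (lines : List (List (Option String))) (m : Int)
    (hm : 0 ≤ m) :
    0 ≤ lines.foldl (fun best line => max best (pvLineBest line symbol)) m := by
  have := (PySem.List.le_foldl_max_int lines (fun l => pvLineBest l symbol) m).1
  omega

theorem pv_ports_agree (board : List (List (Option String))) (symbol : String) :
    max_contiguous board symbol = max_contiguous_alt board symbol := by
  unfold max_contiguous max_contiguous_alt
  set N : Int := (board.length : Int) with hN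
  set g := fun (best : Int) (line : List (Option String)) => max best (pvLineBest line symbol)
    with hg
  set colLine := fun (c : Int) => (PySem.List.pyRange 0 N 1).map (fun r =>
      PySem.List.pyGetD (PySem.List.pyGetD board r []) c none) with hcol
  set d1 := (PySem.List.pyRange 0 N 1).map (fun i =>
      PySem.List.pyGetD (PySem.List.pyGetD board i []) i none) with hd1
  set d2 := (PySem.List.pyRange 0 N 1).map (fun i =>
      PySem.List.pyGetD (PySem.List.pyGetD board i []) (N - 1 - i) none) with hd2
  -- rows
  have hm1 : board.foldl (fun maxLen row => (row.foldl (pvStepA symbol) (maxLen, 0)).1) 0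
      = board.foldl g 0 := pv_fold_lines symbol board 0 le_rfl
  have hB1 : 0 ≤ board.foldl g 0 := pv_fold_lines_nonneg symbol board 0 le_rfl
  -- columns
  have hbody : (fun (maxLen : Int) (col : Int) =>
        ((PySem.List.pyRange 0 N 1).foldl
          (fun p r => pvStepA symbol p (PySem.List.pyGetD (PySem.List.pyGetD board r []) col none))
          (maxLen, 0)).1)
      = fun (maxLen : Int) (col : Int) => ((colLine col).foldl (pvStepA symbol) (maxLen, 0)).1 := by
    funext ml c
    rw [hcol]
    rw [List.foldl_map]
  have hm2 : (PySem.List.pyRange 0 N 1).foldl (fun maxLen col =>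
        ((PySem.List.pyRange 0 N 1).foldl
          (fun p r => pvStepA symbol p (PySem.List.pyGetD (PySem.List.pyGetD board r []) col none))
          (maxLen, 0)).1) (board.foldl g 0)
      = ((PySem.List.pyRange 0 N 1).map colLine).foldl g (board.foldl g 0) := by
    have hmap : ((PySem.List.pyRange 0 N 1).map colLine).foldl
        (fun (acc : Int) line => (line.foldl (pvStepA symbol) (acc, 0)).1) (board.foldl g 0)
        = (PySem.List.pyRange 0 N 1).foldl
          (fun (acc : Int) c => ((colLine c).foldl (pvStepA symbol) (acc, 0)).1)
          (board.foldl g 0) := by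
      rw [List.foldl_map]
    rw [hbody, ← hmap,
      pv_fold_lines symbol ((PySem.List.pyRange 0 N 1).map colLine) (board.foldl g 0) hB1]
  have hB2 : 0 ≤ List.foldl g (List.foldl g 0 board) (List.map colLine (PySem.List.pyRange 0 N 1)) :=
    pv_fold_lines_nonneg symbol _ _ hB1
  -- diagonals: each pyRange fold is a fold over d1 / d2 (List.foldl_map)
  have hd1fold : ∀ m : Int, 0 ≤ m →
      (List.foldl (fun p i => pvStepA symbol p (PySem.List.pyGetD (PySem.List.pyGetD board i []) i none))
        (m, 0) (PySem.List.pyRange 0 N 1)).1 = g m d1 := by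
    intro m hm
    have h : List.foldl (fun p i => pvStepA symbol p
        (PySem.List.pyGetD (PySem.List.pyGetD board i []) i none)) (m, 0) (PySem.List.pyRange 0 N 1)
        = List.foldl (pvStepA symbol) (m, 0) d1 := by
      rw [hd1, List.foldl_map]
    rw [h]
    exact pv_fold_line0 symbol d1 m hm
  have hd2fold : ∀ m : Int, 0 ≤ m →
      (List.foldl (fun p i => pvStepA symbol p
        (PySem.List.pyGetD (PySem.List.pyGetD board i []) (N - 1 - i) none))
        (m, 0) (PySem.List.pyRange 0 N 1)).1 = g m d2 := by
    intro m hm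
    have h : List.foldl (fun p i => pvStepA symbol p
        (PySem.List.pyGetD (PySem.List.pyGetD board i []) (N - 1 - i) none)) (m, 0)
          (PySem.List.pyRange 0 N 1)
        = List.foldl (pvStepA symbol) (m, 0) d2 := by
      rw [hd2, List.foldl_map]
    rw [h]
    exact pv_fold_line0 symbol d2 m hm
  have main : (List.foldl (fun p i => pvStepA symbol p
        (PySem.List.pyGetD (PySem.List.pyGetD board i []) (N - 1 - i) none))
      ((List.foldl (fun p i => pvStepA symbol p
          (PySem.List.pyGetD (PySem.List.pyGetD board i []) i none))
        ((List.foldl (fun maxLen col =>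
            (List.foldl (fun p r => pvStepA symbol p
              (PySem.List.pyGetD (PySem.List.pyGetD board r []) col none))
              (maxLen, 0) (PySem.List.pyRange 0 N 1)).1)
          (List.foldl (fun maxLen row => (List.foldl (pvStepA symbol) (maxLen, 0) row).1) 0 board)
          (PySem.List.pyRange 0 N 1)), 0) (PySem.List.pyRange 0 N 1)).1, 0)
      (PySem.List.pyRange 0 N 1)).1
      = List.foldl g 0 (board ++ List.map colLine (PySem.List.pyRange 0 N 1) ++ [d1] ++ [d2]) := by
    rw [hm1, hm2]
    rw [hd1fold _ hB2]
    rw [hd2fold _ (le_trans hB2 (le_max_left _ _))]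
    rw [List.foldl_append, List.foldl_append, List.foldl_append]
    simp only [List.foldl_cons, List.foldl_nil, hg]
  exact main

-- ===== VERDICT (by name: the statement is the Claim_ definition above) =====
theorem max_contiguous_spec : Claim_equal_max_contiguous := by
  intro board symbol _ _
  unfold Spec_max_contiguous
  exact pv_ports_agree board symbol
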